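-- pv_equiv track=rewrite | github.com/jllan/learn-case | quizzes/two_dim_array.py | f
-- ===== SOURCE A (Python) =====
-- def f(l, n):
--     result = []
--     for j in range(n-1, -1, -1):
--         for k in range(j, n):
--             result.append(l[k-j][k])
--     for i in range(1, n):
--         for k in range(0, n-i):
--             result.append(l[k+i][k])
--     return result
-- ===== SOURCE B (Python) =====
-- def f(l, n):
--     # Single row-major scan grouping cells into buckets keyed by diagonal offset c - r,
--     # then emit buckets from offset n-1 down to -(n-1).
--     buckets = {}
--     for r in range(n):
--         for c in range(n):
--             buckets.setdefault(c - r, []).append(l[r][c])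
--     result = []
--     for d in range(n - 1, -n, -1):
--         result += buckets.get(d, [])
--     return result
-- ===== Notes on version B (the rewrite author's own statement) =====
-- stated objective: alternative
-- what changed: Replaces A's two triangle-shaped loop nests over diagonals by a single row-major scan that groups cells into a dict of diagonal buckets keyed by c - r, then concatenates the buckets for offsets n-1 down to -(n-1).
import Mathlib
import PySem

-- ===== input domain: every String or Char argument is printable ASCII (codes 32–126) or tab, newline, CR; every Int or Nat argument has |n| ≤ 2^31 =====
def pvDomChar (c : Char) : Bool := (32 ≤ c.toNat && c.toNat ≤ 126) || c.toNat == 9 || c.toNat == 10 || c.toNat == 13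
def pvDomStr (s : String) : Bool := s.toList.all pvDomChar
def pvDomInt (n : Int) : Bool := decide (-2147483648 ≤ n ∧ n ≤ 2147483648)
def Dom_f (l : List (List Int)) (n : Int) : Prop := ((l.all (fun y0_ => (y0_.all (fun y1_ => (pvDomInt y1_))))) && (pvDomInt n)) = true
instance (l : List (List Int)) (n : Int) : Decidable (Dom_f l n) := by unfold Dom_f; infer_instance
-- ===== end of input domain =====

-- B replaces A's two triangle-shaped loop nests by one row-major scan that groups the
-- cells into diagonal buckets keyed by c - r and then emits the buckets for offsets
-- n-1 down to -(n-1) (objective: alternative decomposition, same O(n^2) cost).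

-- ===== PORT A =====
def f (l : List (List Int)) (n : Int) : List Int :=
  let result : List Int := []
  let result := (PySem.List.pyRange (n - 1) (-1) (-1)).foldl (fun result j =>
    (PySem.List.pyRange j n 1).foldl (fun result k =>
      result ++ [PySem.List.pyGetD (PySem.List.pyGetD l (k - j) []) k 0]) result) result
  (PySem.List.pyRange 1 n 1).foldl (fun result i =>
    (PySem.List.pyRange 0 (n - i) 1).foldl (fun result k =>
      result ++ [PySem.List.pyGetD (PySem.List.pyGetD l (k + i) []) k 0]) result) result

-- ===== PORT B =====
def f_alt (l : List (List Int)) (n : Int) : List Int :=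
  let buckets : PySem.Dict Int (List Int) :=
    (PySem.List.pyRange 0 n 1).foldl (fun buckets r =>
      (PySem.List.pyRange 0 n 1).foldl (fun buckets c =>
        buckets.modify (c - r) [] (· ++ [PySem.List.pyGetD (PySem.List.pyGetD l r []) c 0]))
        buckets) PySem.Dict.empty
  (PySem.List.pyRange (n - 1) (-n) (-1)).foldl (fun result d =>
    result ++ buckets.getD d []) []

-- ===== PRECONDITION & SPEC =====
-- Pre_f: exactly the inputs where Python A raises no IndexError: the first n rows
-- exist and each of them has at least n entries (for n ≤ 0 no cell is accessed).
def Pre_f (l : List (List Int)) (n : Int) : Prop :=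
  n ≤ (l.length : Int) ∧ ∀ row ∈ l.take n.toNat, n ≤ (row.length : Int)
instance (l : List (List Int)) (n : Int) : Decidable (Pre_f l n) := by unfold Pre_f; infer_instance
def pvWitness_f : List (List Int) × Int := ([[1, 2], [3, 4]], 2)
def Spec_f (l : List (List Int)) (n : Int) (out : List Int) : Prop := out = f_alt l n
instance (l : List (List Int)) (n : Int) (out : List Int) : Decidable (Spec_f l n out) := by unfold Spec_f; infer_instance

-- ===== CLAIM (what is proved, stated in full; the proofs are below) =====
def Claim_equal_f : Prop := ∀ (l : List (List Int)) (n : Int), Dom_f l n → Pre_f l n → Spec_f l n (f l n)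

-- ===== LEMMAS AND PROOFS =====

-- the cell l[r][c], totalised the way both ports write it
def pvVal (l : List (List Int)) (r c : Int) : Int :=
  PySem.List.pyGetD (PySem.List.pyGetD l r []) c 0

-- the bucket of diagonal offset d, as a filtered row scan
def pvBucket (l : List (List Int)) (n d : Int) : List Int :=
  (PySem.List.pyRange 0 n 1).flatMap
    (fun r => if 0 ≤ r + d ∧ r + d < n then [pvVal l r (r + d)] else [])

theorem pyRange_filter_beq (a b x : Int) :
    (PySem.List.pyRange a b 1).filter (fun c => c == x) =
      if a ≤ x ∧ x < b then [x] else [] := by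
  have H : ∀ (m : Nat) (a : Int), b - a ≤ m →
      (PySem.List.pyRange a b 1).filter (fun c => c == x) =
        if a ≤ x ∧ x < b then [x] else [] := by
    intro m
    induction m with
    | zero =>
      intro a h
      rw [PySem.List.pyRange_one_eq_nil (by omega), List.filter_nil, if_neg (by omega)]
    | succ m ih =>
      intro a h
      by_cases hba : b ≤ a
      · rw [PySem.List.pyRange_one_eq_nil hba, List.filter_nil, if_neg (by omega)]
      · rw [PySem.List.pyRange_one_cons (by omega), List.filter_cons, ih (a + 1) (by omega)]
        by_cases hax : a = x
        · subst hax
          rw [if_neg (show ¬(a + 1 ≤ a ∧ a < b) by omega)]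
          simp only [BEq.rfl, if_true]
          rw [if_pos ⟨le_refl a, by omega⟩]
        · have hne : (a == x) = false := by simp [hax]
          simp only [hne, Bool.false_eq_true, if_false]
          exact if_congr (by omega) rfl rfl
  exact H (b - a).toNat a (by omega)

-- the grouping loop of B, characterised diagonal by diagonal
theorem buckets_getD (l : List (List Int)) (n d : Int) :
    ((PySem.List.pyRange 0 n 1).foldl (fun buckets r =>
      (PySem.List.pyRange 0 n 1).foldl (fun buckets c =>
        buckets.modify (c - r) [] (· ++ [PySem.List.pyGetD (PySem.List.pyGetD l r []) c 0]))
        buckets) PySem.Dict.empty).getD d [] = pvBucket l n d := by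
  have h1 : ((PySem.List.pyRange 0 n 1).flatMap (fun r =>
        (PySem.List.pyRange 0 n 1).map (fun c => (c - r, pvVal l r c)))).foldl
        (fun (b : PySem.Dict Int (List Int)) p => b.modify p.1 [] (· ++ [p.2])) PySem.Dict.empty
      = (PySem.List.pyRange 0 n 1).foldl (fun buckets r =>
      (PySem.List.pyRange 0 n 1).foldl (fun buckets c =>
        buckets.modify (c - r) [] (· ++ [PySem.List.pyGetD (PySem.List.pyGetD l r []) c 0]))
        buckets) PySem.Dict.empty := by
    rw [List.flatMap_def, List.foldl_flatten, List.foldl_map]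
    simp only [List.foldl_map]
    rfl
  rw [← h1, PySem.Dict.getD_foldl_modify_append]
  rw [PySem.Dict.getD_empty, List.nil_append]
  rw [List.filter_flatMap, List.map_flatMap]
  unfold pvBucket
  apply List.flatMap_congr
  intro r hr
  rw [List.filter_map]
  rw [show ((fun p : Int × Int => p.1 == d) ∘ (fun c => (c - r, pvVal l r c))) = fun c => c - r == d from rfl]
  have hpred : (PySem.List.pyRange 0 n 1).filter (fun c => c - r == d)
      = (PySem.List.pyRange 0 n 1).filter (fun c => c == r + d) := by
    apply List.filter_congr
    intro c _
    rw [Bool.eq_iff_iff, beq_iff_eq, beq_iff_eq]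
    omega
  rw [hpred, pyRange_filter_beq]
  by_cases hc : 0 ≤ r + d ∧ r + d < n
  · rw [if_pos (by omega), if_pos hc]
    simp
  · rw [if_neg (by omega), if_neg hc]
    simp

theorem f_alt_eq_flatMap (l : List (List Int)) (n : Int) :
    f_alt l n = (PySem.List.pyRange (n - 1) (-n) (-1)).flatMap (pvBucket l n) := by
  unfold f_alt
  rw [PySem.List.foldl_append_eq_flatMap, List.nil_append]
  apply List.flatMap_congr
  intro d _
  exact buckets_getD l n d

theorem f_eq_flatMap (l : List (List Int)) (n : Int) :
    f l n =
      (PySem.List.pyRange (n - 1) (-1) (-1)).flatMap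
        (fun j => (PySem.List.pyRange j n 1).map (fun k => pvVal l (k - j) k)) ++
      (PySem.List.pyRange 1 n 1).flatMap
        (fun i => (PySem.List.pyRange 0 (n - i) 1).map (fun k => pvVal l (k + i) k)) := by
  unfold f
  simp only [PySem.List.foldl_append_singleton_eq_map, PySem.List.foldl_append_eq_flatMap,
    List.nil_append]
  rfl

theorem bucket_pos (l : List (List Int)) (n j : Int) (h0 : 0 ≤ j) (h1 : j < n) :
    pvBucket l n j = (PySem.List.pyRange j n 1).map (fun k => pvVal l (k - j) k) := by
  unfold pvBucket
  rw [PySem.List.pyRange_one_append 0 (n - j) n (by omega) (by omega), List.flatMap_append]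
  have hA : (PySem.List.pyRange 0 (n - j) 1).flatMap
      (fun r => if 0 ≤ r + j ∧ r + j < n then [pvVal l r (r + j)] else [])
      = (PySem.List.pyRange 0 (n - j) 1).map (fun r => pvVal l r (r + j)) := by
    rw [List.flatMap_congr (g := fun r => [pvVal l r (r + j)]) ?_]
    · exact (List.map_eq_flatMap).symm
    intro r hr
    rw [PySem.List.mem_pyRange_one] at hr
    rw [if_pos (by omega)]
  have hB : (PySem.List.pyRange (n - j) n 1).flatMap
      (fun r => if 0 ≤ r + j ∧ r + j < n then [pvVal l r (r + j)] else []) = [] := by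
    rw [List.flatMap_congr (g := fun _ => ([] : List Int)) ?_]
    · simp
    intro r hr
    rw [PySem.List.mem_pyRange_one] at hr
    rw [if_neg (by omega)]
  rw [hA, hB, List.append_nil]
  rw [PySem.List.pyRange_one, PySem.List.pyRange_one]
  simp only [List.map_map, Int.sub_zero]
  apply List.map_congr_left
  intro t _
  simp only [Function.comp_apply]
  rw [show (0:Int) + t = t by ring, show j + t - j = t by ring, show t + j = j + t by ring]

theorem bucket_neg (l : List (List Int)) (n i : Int) (h0 : 1 ≤ i) (h1 : i < n) :
    pvBucket l n (-i) = (PySem.List.pyRange 0 (n - i) 1).map (fun k => pvVal l (k + i) k) := by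
  unfold pvBucket
  rw [PySem.List.pyRange_one_append 0 i n (by omega) (by omega), List.flatMap_append]
  have hA : (PySem.List.pyRange 0 i 1).flatMap
      (fun r => if 0 ≤ r + -i ∧ r + -i < n then [pvVal l r (r + -i)] else []) = [] := by
    rw [List.flatMap_congr (g := fun _ => ([] : List Int)) ?_]
    · simp
    intro r hr
    rw [PySem.List.mem_pyRange_one] at hr
    rw [if_neg (by omega)]
  have hB : (PySem.List.pyRange i n 1).flatMap
      (fun r => if 0 ≤ r + -i ∧ r + -i < n then [pvVal l r (r + -i)] else [])
      = (PySem.List.pyRange i n 1).map (fun r => pvVal l r (r + -i)) := by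
    rw [List.flatMap_congr (g := fun r => [pvVal l r (r + -i)]) ?_]
    · exact (List.map_eq_flatMap).symm
    intro r hr
    rw [PySem.List.mem_pyRange_one] at hr
    rw [if_pos (by omega)]
  rw [hA, hB, List.nil_append]
  rw [PySem.List.pyRange_one, PySem.List.pyRange_one]
  simp only [List.map_map, Int.sub_zero]
  apply List.map_congr_left
  intro t _
  simp only [Function.comp_apply]
  rw [show i + (t:Int) + -i = t by ring, show (0:Int) + t + i = i + t by ring,
    show (0:Int) + t = t by ring]

-- the diagonal-offset countdown splits into A's two loop index lists
theorem range_split (n : Int) (hn : 1 ≤ n) :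
    PySem.List.pyRange (n - 1) (-n) (-1) =
      PySem.List.pyRange (n - 1) (-1) (-1) ++ PySem.List.pyRange (-1) (-n) (-1) := by
  rw [PySem.List.pyRange_neg_one_eq_reverse, PySem.List.pyRange_neg_one_eq_reverse,
    PySem.List.pyRange_neg_one_eq_reverse, ← List.reverse_append]
  rw [show (-1 : Int) + 1 = 0 by ring]
  exact congrArg List.reverse (PySem.List.pyRange_one_append (-n + 1) 0 (n - 1 + 1)
    (by omega) (by omega))

theorem range_neg_eq_map (n : Int) :
    PySem.List.pyRange (-1) (-n) (-1) = (PySem.List.pyRange 1 n 1).map (fun i => -i) := by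
  rw [PySem.List.pyRange_neg_one, PySem.List.pyRange_one, List.map_map]
  rw [show (-1 : Int) - -n = n - 1 by ring]
  apply List.map_congr_left
  intro t _
  simp only [Function.comp_apply]
  ring

-- ===== VERDICT (by name: the statement is the Claim_ definition above) =====
theorem f_spec : Claim_equal_f := by
  intro l n _ _
  unfold Spec_f
  rw [f_eq_flatMap, f_alt_eq_flatMap]
  by_cases hn : n ≤ 0
  · rw [PySem.List.pyRange_neg_one_eq_nil (by omega),
      PySem.List.pyRange_one_eq_nil (by omega),
      PySem.List.pyRange_neg_one_eq_nil (by omega)]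
    simp
  · rw [range_split n (by omega), List.flatMap_append]
    congr 1
    · symm
      apply List.flatMap_congr
      intro j hj
      rw [PySem.List.mem_pyRange_neg_one] at hj
      exact bucket_pos l n j (by omega) (by omega)
    · rw [range_neg_eq_map, List.flatMap_map]
      symm
      apply List.flatMap_congr
      intro i hi
      rw [PySem.List.mem_pyRange_one] at hi
      exact bucket_neg l n i hi.1 hi.2
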